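-- pv_equiv track=rewrite | github.com/rifle-ak/Bastion-Server | agent/tools/mod_conflict_check.py | _find_conflicts
-- ===== SOURCE A (Python) =====
-- def _find_conflicts(
--     plugins: list[str],
--     conflict_db: list[tuple[set[str], str, str, str]],
-- ) -> list[dict[str, str]]:
--     """Check a list of plugin names against a conflict database.
--
--     Returns a list of conflict dicts with keys: severity, description,
--     recommendation, conflicting_plugins.
--     """
--     conflicts: list[dict[str, str]] = []
--
--     for pattern_set, severity, description, recommendation in conflict_db:
--         matched = [p for p in plugins if p in pattern_set]
--         if len(matched) >= 2 or (len(pattern_set) == 1 and len(matched) == 1):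
--             # For single-entry sets (advisory warnings), only flag if the plugin exists
--             # For multi-entry sets, flag when 2+ conflicting plugins are present
--             if len(pattern_set) == 1 or len(matched) >= 2:
--                 conflicts.append({
--                     "severity": severity,
--                     "conflicting_plugins": ", ".join(sorted(set(matched))),
--                     "description": description,
--                     "recommendation": recommendation,
--                 })
--
--     return conflicts
-- ===== SOURCE B (Python) =====
-- def _find_conflicts(
--     plugins: list[str],
--     conflict_db: list[tuple[set[str], str, str, str]],
-- ) -> list[dict[str, str]]:
--     """Check a list of plugin names against a conflict database.
--
--     One pass over plugins builds an occurrence counter; each rule is then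
--     answered by consulting the counter over its (small) pattern set instead
--     of re-scanning the plugin list.
--     """
--     counts: dict[str, int] = {}
--     for p in plugins:
--         counts[p] = counts.get(p, 0) + 1
--
--     conflicts: list[dict[str, str]] = []
--     for pattern_set, severity, description, recommendation in conflict_db:
--         hits = sorted(name for name in pattern_set if name in counts)
--         total = sum(counts[name] for name in hits)
--         if total >= 2 or (len(pattern_set) == 1 and total == 1):
--             conflicts.append({
--                 "severity": severity,
--                 "conflicting_plugins": ", ".join(hits),
--                 "description": description,
--                 "recommendation": recommendation,
--             })
--     return conflicts
-- ===== Notes on version B (the rewrite author's own statement) =====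
-- stated objective: faster
-- what changed: B builds a plugin-occurrence counter in one pass and answers each rule by looking up its pattern names in the counter, instead of re-filtering the whole plugin list per rule.
import Mathlib
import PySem

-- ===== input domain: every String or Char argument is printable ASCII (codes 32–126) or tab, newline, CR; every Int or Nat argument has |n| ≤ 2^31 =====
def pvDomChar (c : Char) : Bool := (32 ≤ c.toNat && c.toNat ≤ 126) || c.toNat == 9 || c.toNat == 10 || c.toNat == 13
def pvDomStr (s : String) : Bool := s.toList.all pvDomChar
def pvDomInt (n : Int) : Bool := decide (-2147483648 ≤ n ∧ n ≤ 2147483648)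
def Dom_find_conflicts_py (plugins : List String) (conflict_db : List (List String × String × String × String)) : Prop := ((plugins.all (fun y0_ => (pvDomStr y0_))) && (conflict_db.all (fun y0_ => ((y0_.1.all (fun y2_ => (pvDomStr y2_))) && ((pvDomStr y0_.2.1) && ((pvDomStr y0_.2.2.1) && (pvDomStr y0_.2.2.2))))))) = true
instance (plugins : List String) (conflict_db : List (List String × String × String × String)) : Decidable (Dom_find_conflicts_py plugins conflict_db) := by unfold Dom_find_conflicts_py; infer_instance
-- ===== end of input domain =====

-- B replaces A's per-rule re-scan of the plugin list by a single occurrence counter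
-- consulted per pattern name; equivalence is proved on inputs whose pattern lists are
-- duplicate-free (the Python sets they represent).

-- ===== PORT A =====
def find_conflicts_py (plugins : List String) (conflict_db : List (List String × String × String × String)) : List (List (String × String)) :=
  conflict_db.foldl (fun conflicts e =>
    let matched := plugins.filter (fun p => e.1.contains p)
    if 2 ≤ matched.length ∨ (e.1.length = 1 ∧ matched.length = 1) then
      if e.1.length = 1 ∨ 2 ≤ matched.length then
        conflicts ++ [[("severity", e.2.1),
                       ("conflicting_plugins",
                         PySem.Str.join ", " (PySem.List.sorted (PySem.Set.ofList matched) (fun x => x) false)),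
                       ("description", e.2.2.1),
                       ("recommendation", e.2.2.2)]]
      else conflicts
    else conflicts) []

-- ===== PORT B =====
def find_conflicts_py_alt (plugins : List String) (conflict_db : List (List String × String × String × String)) : List (List (String × String)) :=
  let counts := plugins.foldl (fun d p => d.insert p (d.getD p 0 + 1)) (PySem.Dict.empty : PySem.Dict String Int)
  conflict_db.foldl (fun conflicts e =>
    let hits := PySem.List.sorted (e.1.filter (fun name => counts.contains name)) (fun x => x) false
    let total := (hits.map (fun name => counts.getD name 0)).sum
    if 2 ≤ total ∨ (e.1.length = 1 ∧ total = 1) then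
      conflicts ++ [[("severity", e.2.1),
                     ("conflicting_plugins", PySem.Str.join ", " hits),
                     ("description", e.2.2.1),
                     ("recommendation", e.2.2.2)]]
    else conflicts) []

-- ===== PRECONDITION & SPEC =====
-- Pre_ only encodes the type convention: each rule's first component represents a Python
-- set, so its List String form carries distinct elements; no input a Python caller can
-- pass is excluded.
def Pre_find_conflicts_py (plugins : List String) (conflict_db : List (List String × String × String × String)) : Prop :=
  ∀ e ∈ conflict_db, e.1.Nodup
instance (plugins : List String) (conflict_db : List (List String × String × String × String)) : Decidable (Pre_find_conflicts_py plugins conflict_db) := by unfold Pre_find_conflicts_py; infer_instance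
def pvWitness_find_conflicts_py : List String × (List (List String × String × String × String)) :=
  (["a", "b", "a"], [(["a", "b"], "high", "dup", "remove one"), (["z"], "low", "adv", "check")])
def Spec_find_conflicts_py (plugins : List String) (conflict_db : List (List String × String × String × String)) (out : List (List (String × String))) : Prop := out = find_conflicts_py_alt plugins conflict_db
instance (plugins : List String) (conflict_db : List (List String × String × String × String)) (out : List (List (String × String))) : Decidable (Spec_find_conflicts_py plugins conflict_db out) := by unfold Spec_find_conflicts_py; infer_instance

-- ===== CLAIM (what is proved, stated in full; the proofs are below) =====
def Claim_equal_find_conflicts_py : Prop := ∀ (plugins : List String) (conflict_db : List (List String × String × String × String)), Dom_find_conflicts_py plugins conflict_db → Pre_find_conflicts_py plugins conflict_db → Spec_find_conflicts_py plugins conflict_db (find_conflicts_py plugins conflict_db)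

-- ===== LEMMAS AND PROOFS =====

-- B's counter loop is collections.Counter(plugins)
theorem counts_eq_counter (plugins : List String) :
    plugins.foldl (fun d p => d.insert p (d.getD p 0 + 1)) (PySem.Dict.empty : PySem.Dict String Int)
      = PySem.Dict.counter plugins :=
  PySem.Dict.foldl_insert_getD_add_one_eq_counter plugins

-- the sorted distinct matches of a rule, computed either way, coincide
theorem hits_eq (plugins ps : List String) (hnd : ps.Nodup) :
    PySem.List.sorted (PySem.Set.ofList (plugins.filter (fun p => ps.contains p))) (fun x => x) false
      = PySem.List.sorted (ps.filter (fun name => (PySem.Dict.counter plugins).contains name)) (fun x => x) false := by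
  apply PySem.List.sorted_eq_sorted_of_perm _ _ _ (fun a b h => h)
  rw [List.perm_ext_iff_of_nodup (PySem.Set.nodup_ofList _) (hnd.filter _)]
  intro x
  simp [PySem.Set.mem_ofList, List.mem_filter, PySem.Dict.contains_counter]
  tauto

-- length of A's matched list, split at the head of the pattern list
theorem filter_cons_length (t : List String) (a : String) (hat : a ∉ t) (plugins : List String) :
    (plugins.filter (fun p => (a :: t).contains p)).length
      = plugins.count a + (plugins.filter (fun p => t.contains p)).length := by
  induction plugins with
  | nil => simp
  | cons q r ih =>
    simp only [List.filter_cons, List.count_cons, List.contains_eq_mem, List.mem_cons,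
      decide_eq_true_eq] at ih ⊢
    split_ifs <;> simp_all <;> omega

-- the summed counter values over the rule's present names count A's matched list
theorem total_eq (plugins ps : List String) (hnd : ps.Nodup) :
    ((ps.filter (fun name => (PySem.Dict.counter plugins).contains name)).map
        (fun name => (PySem.Dict.counter plugins).getD name 0)).sum
      = ((plugins.filter (fun p => ps.contains p)).length : Int) := by
  induction ps with
  | nil => simp
  | cons a t ih =>
    have hat : a ∉ t := (List.nodup_cons.mp hnd).1
    have iht := ih (List.nodup_cons.mp hnd).2
    rw [filter_cons_length t a hat plugins]
    by_cases hmem : a ∈ plugins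
    · have hc : (PySem.Dict.counter plugins).contains a = true := by
        simp [PySem.Dict.contains_counter, hmem]
      simp only [List.filter_cons, hc, if_pos, List.map_cons, List.sum_cons,
        PySem.Dict.getD_counter]
      simp only [PySem.Dict.getD_counter] at iht
      rw [iht]
      push_cast
      ring
    · have hc : (PySem.Dict.counter plugins).contains a = false := by
        simp [PySem.Dict.contains_counter, hmem]
      have hcnt : plugins.count a = 0 := List.count_eq_zero.mpr hmem
      simp only [List.filter_cons, hc, Bool.false_eq_true, if_false, iht, hcnt]
      push_cast
      ring

-- A's nested guards collapse to B's single condition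
theorem cond_iff (psLen mlen : Nat) :
    ((2 ≤ mlen ∨ (psLen = 1 ∧ mlen = 1)) ∧ (psLen = 1 ∨ 2 ≤ mlen))
      ↔ (2 ≤ (mlen : Int) ∨ (psLen = 1 ∧ (mlen : Int) = 1)) := by
  omega

-- one step of the two folds agrees
theorem step_eq (plugins : List String) (e : List String × String × String × String)
    (hnd : e.1.Nodup) (acc : List (List (String × String))) :
    (let matched := plugins.filter (fun p => e.1.contains p)
     if 2 ≤ matched.length ∨ (e.1.length = 1 ∧ matched.length = 1) then
       if e.1.length = 1 ∨ 2 ≤ matched.length then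
         acc ++ [[("severity", e.2.1),
                  ("conflicting_plugins",
                    PySem.Str.join ", " (PySem.List.sorted (PySem.Set.ofList matched) (fun x => x) false)),
                  ("description", e.2.2.1),
                  ("recommendation", e.2.2.2)]]
       else acc
     else acc)
    = (let hits := PySem.List.sorted (e.1.filter (fun name => (PySem.Dict.counter plugins).contains name)) (fun x => x) false
       let total := (hits.map (fun name => (PySem.Dict.counter plugins).getD name 0)).sum
       if 2 ≤ total ∨ (e.1.length = 1 ∧ total = 1) then
         acc ++ [[("severity", e.2.1),
                  ("conflicting_plugins", PySem.Str.join ", " hits),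
                  ("description", e.2.2.1),
                  ("recommendation", e.2.2.2)]]
       else acc) := by
  have hsum : ((PySem.List.sorted (e.1.filter (fun name => (PySem.Dict.counter plugins).contains name)) (fun x => x) false).map
        (fun name => (PySem.Dict.counter plugins).getD name 0)).sum
      = ((plugins.filter (fun p => e.1.contains p)).length : Int) := by
    rw [((PySem.List.sorted_perm _ _ _).map _).sum_eq]
    exact total_eq plugins e.1 hnd
  simp only [hsum, hits_eq plugins e.1 hnd]
  by_cases h : (2 ≤ (plugins.filter (fun p => e.1.contains p)).length ∨
      (e.1.length = 1 ∧ (plugins.filter (fun p => e.1.contains p)).length = 1)) ∧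
      (e.1.length = 1 ∨ 2 ≤ (plugins.filter (fun p => e.1.contains p)).length)
  · rw [if_pos ((cond_iff _ _).mp h), if_pos h.1, if_pos h.2]
  · have h2 : ¬ (2 ≤ ((plugins.filter (fun p => e.1.contains p)).length : Int) ∨
        (e.1.length = 1 ∧ ((plugins.filter (fun p => e.1.contains p)).length : Int) = 1)) :=
      fun hc => h ((cond_iff _ _).mpr hc)
    rw [if_neg h2]
    by_cases h1 : 2 ≤ (plugins.filter (fun p => e.1.contains p)).length ∨
        (e.1.length = 1 ∧ (plugins.filter (fun p => e.1.contains p)).length = 1)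
    · rw [if_pos h1, if_neg (fun hin => h ⟨h1, hin⟩)]
    · rw [if_neg h1]

theorem fold_eq (plugins : List String) (db : List (List String × String × String × String))
    (hnd : ∀ e ∈ db, e.1.Nodup) (acc : List (List (String × String))) :
    db.foldl (fun conflicts e =>
      let matched := plugins.filter (fun p => e.1.contains p)
      if 2 ≤ matched.length ∨ (e.1.length = 1 ∧ matched.length = 1) then
        if e.1.length = 1 ∨ 2 ≤ matched.length then
          conflicts ++ [[("severity", e.2.1),
                         ("conflicting_plugins",
                           PySem.Str.join ", " (PySem.List.sorted (PySem.Set.ofList matched) (fun x => x) false)),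
                         ("description", e.2.2.1),
                         ("recommendation", e.2.2.2)]]
        else conflicts
      else conflicts) acc
    = db.foldl (fun conflicts e =>
      let hits := PySem.List.sorted (e.1.filter (fun name => (PySem.Dict.counter plugins).contains name)) (fun x => x) false
      let total := (hits.map (fun name => (PySem.Dict.counter plugins).getD name 0)).sum
      if 2 ≤ total ∨ (e.1.length = 1 ∧ total = 1) then
        conflicts ++ [[("severity", e.2.1),
                       ("conflicting_plugins", PySem.Str.join ", " hits),
                       ("description", e.2.2.1),
                       ("recommendation", e.2.2.2)]]
      else conflicts) acc := by
  induction db generalizing acc with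
  | nil => rfl
  | cons e t ih =>
    simp only [List.foldl_cons]
    rw [step_eq plugins e (hnd e (by simp)) acc]
    exact ih (fun x hx => hnd x (by simp [hx])) _

-- ===== VERDICT (by name: the statement is the Claim_ definition above) =====
theorem find_conflicts_py_spec : Claim_equal_find_conflicts_py := by
  intro plugins db _ hpre
  unfold Spec_find_conflicts_py find_conflicts_py find_conflicts_py_alt
  rw [counts_eq_counter]
  exact fold_eq plugins db hpre []
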